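-- pv_equiv track=rewrite | github.com/microsoft/task_oriented_dialogue_as_dataflow_synthesis | src/dataflow/core/lispress.py | _group_named_args
-- ===== SOURCE A (Python) =====
-- from typing import Dict, Iterator, List, Optional, Set, Tuple
--
-- NAMED_ARG_PREFIX = ":"
--
-- def _group_named_args(lines: List[str]) -> List[str]:
--     """
--     Helper function for `_render_lines`.
--     Joins `:name` and `argument` lines into a single line.
--     """
--     result = []
--     i = 0
--     while i < len(lines):
--         line = lines[i]
--         if _is_named_arg(line):
--             result.append(" ".join(lines[i : i + 2]))
--             i += 2
--         else:
--             result.append(line)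
--             i += 1
--     return result
--
-- def _is_named_arg(name: str) -> bool:
--     return name.startswith(NAMED_ARG_PREFIX)
-- ===== SOURCE B (Python) =====
-- NAMED_ARG_PREFIX = ":"
--
-- def _is_named_arg(name: str) -> bool:
--     return name.startswith(NAMED_ARG_PREFIX)
--
-- def _group_named_args(lines):
--     """Single forward pass holding a pending named-arg line instead of index look-ahead."""
--     result = []
--     pending = None
--     for line in lines:
--         if pending is not None:
--             result.append(" ".join([pending, line]))
--             pending = None
--         elif _is_named_arg(line):
--             pending = line
--         else:
--             result.append(line)
--     if pending is not None:
--         result.append(pending)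
--     return result
-- ===== Notes on version B (the rewrite author's own statement) =====
-- stated objective: alternative
-- what changed: Replaced the index-based while loop with slice look-ahead (lines[i:i+2]) by a single for-each pass that carries a pending named-arg line in state and flushes it after the loop.
import Mathlib
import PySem

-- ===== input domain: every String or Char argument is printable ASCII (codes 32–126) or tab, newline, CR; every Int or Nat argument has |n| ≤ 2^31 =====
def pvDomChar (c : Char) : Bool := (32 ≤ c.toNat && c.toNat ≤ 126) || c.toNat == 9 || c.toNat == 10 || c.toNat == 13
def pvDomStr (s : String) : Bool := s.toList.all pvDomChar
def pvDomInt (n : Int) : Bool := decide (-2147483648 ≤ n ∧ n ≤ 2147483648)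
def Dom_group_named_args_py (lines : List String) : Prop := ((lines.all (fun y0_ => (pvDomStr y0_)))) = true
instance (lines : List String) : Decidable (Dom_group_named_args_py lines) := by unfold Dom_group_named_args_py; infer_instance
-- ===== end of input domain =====

-- B: same task as a single forward pass carrying a pending named-arg line instead of index look-ahead (alternative decomposition, same cost).
-- ===== PORT A =====
-- while loop over index i, consuming one or two lines per step
def groupLoopA : List String → List String
  | [] => []
  | l :: rest =>
    if PySem.Str.startswith l ":" then
      match rest with
      | [] => [PySem.Str.join " " [l]]
      | r :: rest' => PySem.Str.join " " [l, r] :: groupLoopA rest'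
    else
      l :: groupLoopA rest

def group_named_args_py (lines : List String) : List String := groupLoopA lines

-- ===== PORT B =====
-- fold over the lines with state (result, pending); flush pending after the loop
def groupStepB (st : List String × Option String) (line : String) : List String × Option String :=
  match st.2 with
  | some p => (st.1 ++ [PySem.Str.join " " [p, line]], none)
  | none =>
    if PySem.Str.startswith line ":" then (st.1, some line)
    else (st.1 ++ [line], none)

def group_named_args_py_alt (lines : List String) : List String :=
  let st := lines.foldl groupStepB ([], none)
  match st.2 with
  | some p => st.1 ++ [p]
  | none => st.1

-- ===== PRECONDITION & SPEC =====
def Spec_group_named_args_py (lines : List String) (out : List String) : Prop := out = group_named_args_py_alt lines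
instance (lines : List String) (out : List String) : Decidable (Spec_group_named_args_py lines out) := by unfold Spec_group_named_args_py; infer_instance

-- ===== CLAIM (what is proved, stated in full; the proofs are below) =====
def Claim_equal_group_named_args_py : Prop := ∀ (lines : List String), Dom_group_named_args_py lines → Spec_group_named_args_py lines (group_named_args_py lines)

-- ===== LEMMAS AND PROOFS =====

def groupFlush (st : List String × Option String) : List String :=
  match st.2 with
  | some p => st.1 ++ [p]
  | none => st.1

theorem join_single (l : String) : PySem.Str.join " " [l] = l := by
  simp [PySem.Str.join]

theorem groupLoop_eq_fold (lines : List String) :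
    ∀ acc : List String,
      groupFlush (lines.foldl groupStepB (acc, none)) = acc ++ groupLoopA lines := by
  induction lines using groupLoopA.induct with
  | case1 => intro acc; simp [groupFlush, groupLoopA]
  | case2 l hs =>
      intro acc
      simp at hs
      simp [List.foldl, groupStepB, groupFlush, groupLoopA, hs, join_single]
  | case3 l hs r rest ih =>
      intro acc
      simp only [List.foldl, groupStepB, hs, if_true]
      rw [ih]
      have hs' := hs; simp at hs'
      simp [groupLoopA, hs']
  | case4 l rest hs ih =>
      intro acc
      rw [Bool.not_eq_true] at hs
      simp only [List.foldl, groupStepB, hs, Bool.false_eq_true, if_false]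
      rw [ih]
      have hs' := hs; simp at hs'
      cases rest <;> simp [groupLoopA, hs']

-- ===== VERDICT (by name: the statement is the Claim_ definition above) =====
theorem group_named_args_py_spec : Claim_equal_group_named_args_py := by
  intro lines _
  unfold Spec_group_named_args_py group_named_args_py group_named_args_py_alt
  have h := groupLoop_eq_fold lines []
  simpa [groupFlush] using h.symm
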